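-- pv_equiv track=rewrite | github.com/Nogal2222/CoTe | SW 엑스퍼트 아카데미/D3/코딩 토너먼트1.py | draft
-- ===== SOURCE A (Python) =====
-- def draft(draw, gap):
--     next_round = []
--
--     if len(draw) == 1:
--         return gap
--
--     for i in range(0, len(draw), 2):
--         gap += abs(draw[i] - draw[i+1])
--         next_round.append(max(draw[i], draw[i+1]))
--
--     return draft(next_round, gap)
-- ===== SOURCE B (Python) =====
-- def _tourney(draw):
--     # winner and total gap of the bracket over draw, top-down divide & conquer
--     if len(draw) == 1:
--         return draw[0], 0
--     mid = len(draw) // 2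
--     a, g1 = _tourney(draw[:mid])
--     b, g2 = _tourney(draw[mid:])
--     return max(a, b), g1 + g2 + abs(a - b)
--
-- def draft(draw, gap):
--     if len(draw) == 1:
--         return gap
--     _w, total = _tourney(draw)
--     return gap + total
-- ===== Notes on version B (the rewrite author's own statement) =====
-- stated objective: alternative
-- what changed: Replaces the bottom-up round-by-round recursion (rebuild the whole next-round list each pass) by a top-down divide-and-conquer over bracket halves that returns (winner, accumulated gap) in one recursion.
import Mathlib
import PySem

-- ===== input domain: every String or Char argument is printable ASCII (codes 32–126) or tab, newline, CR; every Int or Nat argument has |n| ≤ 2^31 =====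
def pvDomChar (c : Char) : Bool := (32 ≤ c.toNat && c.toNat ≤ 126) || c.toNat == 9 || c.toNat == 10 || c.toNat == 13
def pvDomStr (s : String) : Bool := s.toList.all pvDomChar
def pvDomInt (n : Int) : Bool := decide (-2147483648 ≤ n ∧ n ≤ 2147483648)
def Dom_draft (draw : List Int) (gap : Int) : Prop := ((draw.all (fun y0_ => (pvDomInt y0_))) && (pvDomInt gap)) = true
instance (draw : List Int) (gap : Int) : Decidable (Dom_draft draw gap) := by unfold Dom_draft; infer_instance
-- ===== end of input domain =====

-- B replaces A's bottom-up round recursion by a top-down divide-and-conquer over bracket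
-- halves (objective: alternative decomposition, same cost). Equal on power-of-two lengths,
-- the only inputs where A returns.

-- ===== PORT A =====
-- the 'for i in range(0, len(draw), 2)' loop of A as the obvious index recursion over the same state
def draftLoop (draw : List Int) (i : Nat) (gap : Int) (next_round : List Int) : Int × List Int :=
  if _h : i < draw.length then
    draftLoop draw (i + 2)
      (gap + |PySem.List.pyGetD draw (i : Int) 0 - PySem.List.pyGetD draw ((i : Int) + 1) 0|)
      (next_round ++ [max (PySem.List.pyGetD draw (i : Int) 0) (PySem.List.pyGetD draw ((i : Int) + 1) 0)])
  else (gap, next_round)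
termination_by draw.length - i

-- length of the next round, needed by draft's termination proof
theorem draftLoop_snd_len (draw : List Int) (i : Nat) (gap : Int) (acc : List Int) :
    (draftLoop draw i gap acc).2.length = acc.length + (draw.length - i + 1) / 2 := by
  unfold draftLoop
  split
  · next h =>
    rw [draftLoop_snd_len]
    simp; omega
  · simp; omega
termination_by draw.length - i

def draft (draw : List Int) (gap : Int) : Int :=
  if draw.length = 1 then gap
  else if draw.length = 0 then gap   -- totality guard: Python A never returns on [] (infinite recursion)
  else
    let r := draftLoop draw 0 gap []
    draft r.2 r.1
termination_by draw.length
decreasing_by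
  have h := draftLoop_snd_len draw 0 gap []
  simp at h; omega

-- ===== PORT B =====
def tourney (draw : List Int) : Int × Int :=
  if draw.length = 1 then (PySem.List.pyGetD draw 0 0, 0)
  else if draw.length = 0 then (0, 0)   -- totality guard: Python B never returns on [] (infinite recursion)
  else
    let mid := draw.length / 2
    let l := tourney (PySem.List.slice draw none (some (mid : Int)))
    let r := tourney (PySem.List.slice draw (some (mid : Int)) none)
    (max l.1 r.1, l.2 + r.2 + |l.1 - r.1|)
termination_by draw.length
decreasing_by
  all_goals
    simp only [PySem.List.slice_to_natCast, PySem.List.slice_from_natCast,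
      List.length_take, List.length_drop]
    omega

def draft_alt (draw : List Int) (gap : Int) : Int :=
  if draw.length = 1 then gap
  else gap + (tourney draw).2

-- ===== PRECONDITION & SPEC =====
-- Pre_: A returns (no exception) exactly when the number of players is a power of two;
-- on every other length A raises (IndexError, or RecursionError on []).
def Pre_draft (draw : List Int) (gap : Int) : Prop :=
  ∃ k, k ≤ draw.length ∧ draw.length = 2 ^ k
instance (draw : List Int) (gap : Int) : Decidable (Pre_draft draw gap) := by
  unfold Pre_draft; infer_instance

def pvWitness_draft : List Int × Int := ([5, 1, 7, 2], 3)

def Spec_draft (draw : List Int) (gap : Int) (out : Int) : Prop := out = draft_alt draw gap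
instance (draw : List Int) (gap : Int) (out : Int) : Decidable (Spec_draft draw gap out) := by unfold Spec_draft; infer_instance

-- ===== CLAIM (what is proved, stated in full; the proofs are below) =====
def Claim_equal_draft : Prop := ∀ (draw : List Int) (gap : Int), Dom_draft draw gap → Pre_draft draw gap → Spec_draft draw gap (draft draw gap)

-- ===== LEMMAS AND PROOFS =====

-- one round of A, as structural two-step recursion (proof-side characterisation)
def roundMax : List Int → List Int
  | a :: b :: t => max a b :: roundMax t
  | _ => []
def roundGap : List Int → Int
  | a :: b :: t => |a - b| + roundGap t
  | _ => 0

theorem roundMax_length : (l : List Int) → (roundMax l).length = l.length / 2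
  | [] => rfl
  | [_] => by simp [roundMax]
  | a :: b :: t => by simp [roundMax, roundMax_length t]; omega

-- the tournament value by rounds: the common spec both ports are reduced to
def G (l : List Int) : Int :=
  if l.length ≤ 1 then 0 else roundGap l + G (roundMax l)
termination_by l.length
decreasing_by simp [roundMax_length]; omega

def W (l : List Int) : Int :=
  if l.length ≤ 1 then PySem.List.pyGetD l 0 0 else W (roundMax l)
termination_by l.length
decreasing_by simp [roundMax_length]; omega

theorem draftLoop_spec (draw : List Int) (i : Nat) (gap : Int) (acc : List Int)
    (he : (draw.length - i) % 2 = 0) :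
    draftLoop draw i gap acc = (gap + roundGap (draw.drop i), acc ++ roundMax (draw.drop i)) := by
  rw [draftLoop.eq_def]
  split
  · next h =>
    have h1 : i + 1 < draw.length := by omega
    have hd : draw.drop i = draw[i] :: draw[i + 1] :: draw.drop (i + 2) := by
      rw [List.drop_eq_getElem_cons (by omega), List.drop_eq_getElem_cons (by omega)]
    have g1 : PySem.List.pyGetD draw (i : Int) 0 = draw[i] := PySem.List.pyGetD_ofNat draw i 0 h
    have g2 : PySem.List.pyGetD draw ((i : Int) + 1) 0 = draw[i + 1] := by
      have hc : (i : Int) + 1 = ((i + 1 : Nat) : Int) := by push_cast; ring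
      rw [hc]; exact PySem.List.pyGetD_ofNat draw (i + 1) 0 h1
    rw [draftLoop_spec draw (i + 2) _ _ (by omega)]
    rw [hd]
    simp [roundGap, roundMax, g1, g2]
    omega
  · next h =>
    have hnil : draw.drop i = [] := List.drop_eq_nil_of_le (by omega)
    simp [hnil, roundGap, roundMax]
termination_by draw.length - i

theorem draft_eq_G : ∀ (k : Nat) (draw : List Int) (gap : Int), draw.length = 2 ^ k →
    draft draw gap = gap + G draw
  | 0, draw, gap, h => by
    simp only [pow_zero] at h
    rw [draft.eq_def, G.eq_def]
    simp [h]
  | k + 1, draw, gap, h => by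
    have hp : draw.length = 2 ^ k * 2 := by rw [h, Nat.pow_succ]
    have h1 : 1 ≤ 2 ^ k := Nat.one_le_two_pow
    rw [draft.eq_def]
    have hne1 : ¬ draw.length = 1 := by omega
    have hne0 : ¬ draw.length = 0 := by omega
    rw [if_neg hne1, if_neg hne0]
    rw [draftLoop_spec draw 0 gap [] (by omega)]
    simp only [List.drop_zero, List.nil_append]
    rw [draft_eq_G k (roundMax draw) _ (by rw [roundMax_length]; omega)]
    have hle : ¬ draw.length ≤ 1 := by omega
    conv_rhs => rw [G.eq_def, if_neg hle]
    ring

theorem roundMax_append : ∀ (L R : List Int), L.length % 2 = 0 →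
    roundMax (L ++ R) = roundMax L ++ roundMax R
  | [], _, _ => by simp [roundMax]
  | [_], _, h => by simp at h
  | a :: b :: t, R, h => by
    simp only [List.length_cons] at h
    simp [roundMax, roundMax_append t R (by omega)]

theorem roundGap_append : ∀ (L R : List Int), L.length % 2 = 0 →
    roundGap (L ++ R) = roundGap L + roundGap R
  | [], _, _ => by simp [roundGap]
  | [_], _, h => by simp at h
  | a :: b :: t, R, h => by
    simp only [List.length_cons] at h
    simp [roundGap, roundGap_append t R (by omega)]
    ring

theorem WG_append : ∀ (k : Nat) (L R : List Int), L.length = 2 ^ k → R.length = 2 ^ k →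
    W (L ++ R) = max (W L) (W R) ∧ G (L ++ R) = G L + G R + |W L - W R|
  | 0, L, R, hL, hR => by
    simp only [pow_zero, List.length_eq_one_iff] at hL hR
    obtain ⟨a, rfl⟩ := hL; obtain ⟨b, rfl⟩ := hR
    have w1 : ∀ x : Int, W [x] = x := by
      intro x; rw [W.eq_def]; simp [PySem.List.pyGetD_zero_cons]
    have g1 : ∀ x : Int, G [x] = 0 := by
      intro x; rw [G.eq_def]; simp
    have wm : W [a, b] = max a b := by
      rw [W.eq_def]; simp [roundMax, w1]
    have gm : G [a, b] = |a - b| := by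
      rw [G.eq_def]; simp [roundMax, roundGap, g1]
    have hab : [a] ++ [b] = [a, b] := by simp
    rw [hab, wm, gm, w1, w1, g1, g1]
    simp
  | k + 1, L, R, hL, hR => by
    have h1 : 1 ≤ 2 ^ k := Nat.one_le_two_pow
    have hLp : L.length = 2 ^ k * 2 := by rw [hL, Nat.pow_succ]
    have hRp : R.length = 2 ^ k * 2 := by rw [hR, Nat.pow_succ]
    have hLe : ¬ L.length ≤ 1 := by omega
    have hRe : ¬ R.length ≤ 1 := by omega
    have hLRe : ¬ (L ++ R).length ≤ 1 := by simp; omega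
    have hmL : (roundMax L).length = 2 ^ k := by rw [roundMax_length]; omega
    have hmR : (roundMax R).length = 2 ^ k := by rw [roundMax_length]; omega
    have ih := WG_append k (roundMax L) (roundMax R) hmL hmR
    have hra : roundMax (L ++ R) = roundMax L ++ roundMax R := roundMax_append L R (by omega)
    have hga : roundGap (L ++ R) = roundGap L + roundGap R := roundGap_append L R (by omega)
    have wL : W L = W (roundMax L) := by rw [W.eq_def (l := L)]; simp [hLe]
    have wR : W R = W (roundMax R) := by rw [W.eq_def (l := R)]; simp [hRe]
    constructor
    · rw [W.eq_def (l := L ++ R)]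
      simp only [hLRe, if_false]
      rw [hra, ih.1, wL, wR]
    · rw [G.eq_def (l := L ++ R)]
      simp only [hLRe, if_false]
      rw [hra, hga, ih.2, wL, wR]
      rw [G.eq_def (l := L), G.eq_def (l := R)]
      simp only [hLe, hRe, if_false]
      ring

theorem tourney_eq : ∀ (k : Nat) (draw : List Int), draw.length = 2 ^ k →
    tourney draw = (W draw, G draw)
  | 0, draw, h => by
    simp only [pow_zero] at h
    rw [tourney.eq_def, W.eq_def, G.eq_def]
    simp [h]
  | k + 1, draw, h => by
    have h1 : 1 ≤ 2 ^ k := Nat.one_le_two_pow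
    have hp : draw.length = 2 ^ k * 2 := by rw [h, Nat.pow_succ]
    have hmid : draw.length / 2 = 2 ^ k := by omega
    have hne1 : ¬ draw.length = 1 := by omega
    have hne0 : ¬ draw.length = 0 := by omega
    rw [tourney.eq_def, if_neg hne1, if_neg hne0]
    simp only [PySem.List.slice_to_natCast, PySem.List.slice_from_natCast]
    have hTl : (draw.take (draw.length / 2)).length = 2 ^ k := by
      simp [hmid]; omega
    have hDl : (draw.drop (draw.length / 2)).length = 2 ^ k := by
      simp [hmid]; omega
    rw [tourney_eq k _ hTl, tourney_eq k _ hDl]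
    have hw := WG_append k (draw.take (draw.length / 2)) (draw.drop (draw.length / 2)) hTl hDl
    rw [List.take_append_drop] at hw
    simp [hw.1, hw.2]

-- ===== VERDICT (by name: the statement is the Claim_ definition above) =====
theorem draft_spec : Claim_equal_draft := by
  intro draw gap _ hpre
  obtain ⟨k, _, hk⟩ := hpre
  unfold Spec_draft draft_alt
  rw [draft_eq_G k draw gap hk]
  split
  · next h1 =>
    have : k = 0 := by
      by_contra hne
      have : 2 ≤ 2 ^ k := Nat.one_lt_two_pow hne
      omega
    subst this; simp at hk
    unfold G; simp [hk]
  · rw [tourney_eq k draw hk]
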